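-- pv_equiv track=rewrite | github.com/XinweiChai/leetcode_problems | python/problem630.py | scheduleCourse2
-- ===== SOURCE A (Python) =====
-- from typing import Sequence
--
-- def scheduleCourse2(courses: Sequence[Sequence[int]]) -> int:
--     courses.sort(key=lambda x: x[1])
--     time = 0
--     cnt = 0
--     for i in range(len(courses)):
--         if time + courses[i][0] <= courses[i][1]:
--             time += courses[i][0]
--             courses[cnt] = courses[i]
--             cnt += 1
--         else:
--             max_i = i
--             for j in range(cnt):
--                 if courses[j][0] > courses[max_i][0]:
--                     max_i = j
--             if courses[max_i][0] > courses[i][0]: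
--                 time += courses[i][0] - courses[max_i][0]
--                 courses[max_i] = courses[i]
--     return cnt
-- ===== SOURCE B (Python) =====
-- def scheduleCourse2(courses):
--     # Note: unlike the original, this does not mutate `courses`; equivalence is about the return value.
--     ordered = sorted(courses, key=lambda c: c[1])
--     taken = []   # durations of taken courses, kept in ascending order
--     time = 0
--     for c in ordered:
--         d = c[0]
--         # binary search for the insertion point (after existing copies of d)
--         lo, hi = 0, len(taken)
--         while lo < hi:
--             mid = (lo + hi) // 2
--             if taken[mid] <= d:
--                 lo = mid + 1
--             else:
--                 hi = mid
--         taken.insert(lo, d)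
--         time += d
--         if time > c[1]:
--             time -= taken.pop()   # drop the longest course taken so far
--     return len(taken)
-- ===== Notes on version B (the rewrite author's own statement) =====
-- stated objective: alternative
-- what changed: Instead of overwriting a prefix of the input array and rescanning it for the maximum duration on every overflow, B keeps the taken durations in a sorted list (binary-search insert) and simply pops the last element when the deadline is exceeded.
import Mathlib
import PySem

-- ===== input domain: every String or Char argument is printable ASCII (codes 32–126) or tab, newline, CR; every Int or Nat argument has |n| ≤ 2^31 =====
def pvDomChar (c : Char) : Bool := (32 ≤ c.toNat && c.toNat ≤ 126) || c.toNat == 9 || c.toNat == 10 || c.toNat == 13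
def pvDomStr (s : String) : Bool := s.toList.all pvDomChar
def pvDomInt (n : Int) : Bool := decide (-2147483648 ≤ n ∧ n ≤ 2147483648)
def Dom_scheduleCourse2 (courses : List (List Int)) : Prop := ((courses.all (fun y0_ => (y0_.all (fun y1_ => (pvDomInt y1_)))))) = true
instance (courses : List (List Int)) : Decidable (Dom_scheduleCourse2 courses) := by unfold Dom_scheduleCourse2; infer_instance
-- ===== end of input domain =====

-- B keeps the taken durations in a sorted list (binary-search insert, pop the last on overflow) instead of
-- A's in-place prefix overwrite with an inner max-scan; equivalence is about the RETURN VALUE only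
-- (the Python A sorts and overwrites its argument in place, B does not mutate it).

-- ===== PORT A =====
-- one iteration of A's `for i in range(len(courses))` loop; state = (mutated array, time, cnt)
def aStep (st : List (List Int) × Int × Nat) (i : Nat) : List (List Int) × Int × Nat :=
  let arr := st.1; let time := st.2.1; let cnt := st.2.2
  let ci := arr.getD i []
  if time + PySem.List.pyGetD ci 0 0 ≤ PySem.List.pyGetD ci 1 0 then
    (arr.set cnt ci, time + PySem.List.pyGetD ci 0 0, cnt + 1)
  else
    let mi := (List.range cnt).foldl (fun mx j =>
      if PySem.List.pyGetD (arr.getD j []) 0 0 > PySem.List.pyGetD (arr.getD mx []) 0 0 then j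
      else mx) i
    if PySem.List.pyGetD (arr.getD mi []) 0 0 > PySem.List.pyGetD ci 0 0 then
      (arr.set mi ci, time + PySem.List.pyGetD ci 0 0 - PySem.List.pyGetD (arr.getD mi []) 0 0, cnt)
    else (arr, time, cnt)

def scheduleCourse2 (courses : List (List Int)) : Int :=
  let cs := PySem.List.sorted courses (fun x => PySem.List.pyGetD x 1 0) false
  let st := (List.range cs.length).foldl aStep (cs, 0, 0)
  (st.2.2 : Int)

-- ===== PORT B =====
-- the hand-written binary search of Source B (`while lo < hi: …`), transcribed step for step
def bsLoop (taken : List Int) (d : Int) (lo hi : Nat) : Nat :=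
  if _h : lo < hi then
    let mid := (lo + hi) / 2
    if taken.getD mid 0 ≤ d then bsLoop taken d (mid + 1) hi
    else bsLoop taken d lo mid
  else lo
termination_by hi - lo
decreasing_by all_goals omega

-- one iteration of Source B's `for c in ordered` loop; state = (sorted duration list, time)
def bStep (st : List Int × Int) (c : List Int) : List Int × Int :=
  let d := PySem.List.pyGetD c 0 0
  let lo := bsLoop st.1 d 0 st.1.length
  let taken' := PySem.List.insert st.1 (lo : Int) d
  let time' := st.2 + d
  if PySem.List.pyGetD c 1 0 < time' then
    match PySem.List.pop? taken' (-1) with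
    | some (m, rest) => (rest, time' - m)
    | none => (taken', time')   -- unreachable: taken' is nonempty (an element was just inserted)
  else (taken', time')

def scheduleCourse2_alt (courses : List (List Int)) : Int :=
  let ordered := PySem.List.sorted courses (fun c => PySem.List.pyGetD c 1 0) false
  let st := ordered.foldl bStep ([], 0)
  (st.1.length : Int)

-- ===== PRECONDITION & SPEC =====
-- Pre_ excludes exactly the inputs on which the Python A raises IndexError: an inner list with
-- fewer than 2 elements (the sort key reads x[1], the loop reads x[0]).
def Pre_scheduleCourse2 (courses : List (List Int)) : Prop := ∀ c ∈ courses, 2 ≤ c.length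
instance (courses : List (List Int)) : Decidable (Pre_scheduleCourse2 courses) := by
  unfold Pre_scheduleCourse2; infer_instance

def pvWitness_scheduleCourse2 : List (List Int) := [[5, 5], [4, 6], [2, 6]]

def Spec_scheduleCourse2 (courses : List (List Int)) (out : Int) : Prop := out = scheduleCourse2_alt courses
instance (courses : List (List Int)) (out : Int) : Decidable (Spec_scheduleCourse2 courses out) := by
  unfold Spec_scheduleCourse2; infer_instance

-- ===== CLAIM (what is proved, stated in full; the proofs are below) =====
def Claim_equal_scheduleCourse2 : Prop := ∀ (courses : List (List Int)), Dom_scheduleCourse2 courses → Pre_scheduleCourse2 courses → Spec_scheduleCourse2 courses (scheduleCourse2 courses)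

-- ===== LEMMAS AND PROOFS =====

-- duration of a course record, as both ports read it
def pvDur (c : List Int) : Int := PySem.List.pyGetD c 0 0

-- the simulation invariant tying A's loop state to B's after i iterations
-- (cs is the sorted course list both ports iterate over)
def pvInv (cs arr : List (List Int)) (time : Int) (cnt : Nat)
    (taken : List Int) (timeB : Int) (i : Nat) : Prop :=
  arr.length = cs.length ∧ cnt ≤ i ∧
  (∀ j : Nat, i ≤ j → arr.getD j [] = cs.getD j []) ∧
  taken.Pairwise (· ≤ ·) ∧
  (taken : Multiset Int) = (((arr.take cnt).map pvDur : List Int) : Multiset Int) ∧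
  timeB = time ∧ taken.length = cnt

theorem bsLoop_spec (taken : List Int) (d : Int) (lo hi : Nat)
    (hhi : hi ≤ taken.length) (hlohi : lo ≤ hi)
    (h1 : ∀ k, k < lo → taken.getD k 0 ≤ d)
    (h2 : ∀ k, hi ≤ k → k < taken.length → d < taken.getD k 0)
    (hs : taken.Pairwise (· ≤ ·)) :
    bsLoop taken d lo hi ≤ taken.length ∧
    (∀ k, k < bsLoop taken d lo hi → taken.getD k 0 ≤ d) ∧
    (∀ k, bsLoop taken d lo hi ≤ k → k < taken.length → d < taken.getD k 0) := by
  have hpw := List.pairwise_iff_getElem.mp hs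
  have hmono : ∀ p q : Nat, p ≤ q → q < taken.length → taken.getD p 0 ≤ taken.getD q 0 := by
    intro p q hpq hq
    rcases eq_or_lt_of_le hpq with rfl | hlt
    · exact le_refl _
    · rw [List.getD_eq_getElem taken 0 (lt_of_le_of_lt hpq hq), List.getD_eq_getElem taken 0 hq]
      exact hpw p q _ _ hlt
  induction lo, hi using bsLoop.induct taken d with
  | case1 lo hi h mid hle ih =>
    rw [bsLoop, dif_pos h]; simp only []; rw [if_pos hle]
    have hmid : (lo + hi) / 2 < hi := by omega
    exact ih hhi (by omega)
      (fun k hk => le_trans (hmono k ((lo+hi)/2) (by omega) (by omega)) hle) h2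
  | case2 lo hi h mid hgt ih =>
    rw [bsLoop, dif_pos h]; simp only []; rw [if_neg hgt]
    have hmid : lo ≤ (lo + hi) / 2 := by omega
    exact ih (by omega) (by omega) h1
      (fun k hk hk2 => lt_of_lt_of_le (lt_of_not_ge hgt) (hmono ((lo+hi)/2) k hk hk2))
  | case3 lo hi h =>
    rw [bsLoop, dif_neg h]
    have : lo = hi ∨ lo ≤ hi := Or.inr hlohi
    refine ⟨le_trans hlohi hhi, h1, fun k hk hk2 => h2 k (by omega) hk2⟩

theorem sorted_insert_mid (l : List Int) (d : Int) (r : Nat) (hr : r ≤ l.length)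
    (hs : l.Pairwise (· ≤ ·))
    (h1 : ∀ k, k < r → l.getD k 0 ≤ d)
    (h2 : ∀ k, r ≤ k → k < l.length → d < l.getD k 0) :
    (l.take r ++ d :: l.drop r).Pairwise (· ≤ ·) := by
  have hget : ∀ k (hk : k < l.length), l.getD k 0 = l[k] := fun k hk => List.getD_eq_getElem l 0 hk
  have hmemtake : ∀ a ∈ l.take r, a ≤ d := by
    intro a ha
    obtain ⟨k, hk, hak⟩ := List.mem_iff_getElem.mp ha
    have hk' : k < r := lt_of_lt_of_le hk (by simp)
    have hk2 : k < l.length := lt_of_lt_of_le hk' hr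
    have := h1 k hk'
    rw [hget k hk2] at this
    rw [← hak]
    simpa [List.getElem_take] using this
  have hmemdrop : ∀ b ∈ l.drop r, d < b := by
    intro b hb
    obtain ⟨j, hj, hbj⟩ := List.mem_iff_getElem.mp hb
    have hj2 : r + j < l.length := by have := hj; simp [List.length_drop] at this; omega
    have := h2 (r + j) (by omega) hj2
    rw [hget _ hj2] at this
    rw [← hbj]
    simpa using this
  rw [List.pairwise_append]
  refine ⟨hs.sublist (List.take_sublist r l), ?_, ?_⟩
  · rw [List.pairwise_cons]
    exact ⟨fun b hb => le_of_lt (hmemdrop b hb), hs.sublist (List.drop_sublist r l)⟩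
  · intro a ha b hb
    rcases List.mem_cons.mp hb with rfl | hb'
    · exact hmemtake a ha
    · exact le_of_lt (lt_of_le_of_lt (hmemtake a ha) (hmemdrop b hb'))

theorem multiset_set_add {α : Type} (l : List α) (n : Nat) (h : n < l.length) (x : α) :
    ((l.set n x : List α) : Multiset α) + {l[n]} = (l : Multiset α) + {x} := by
  have h1 : (↑(l.set n x) : Multiset α) = ↑(l.take n) + (x ::ₘ ↑(l.drop (n+1))) := by
    rw [List.set_eq_take_cons_drop x h]; simp
  have h2 : (↑l : Multiset α) = ↑(l.take n) + (l[n] ::ₘ ↑(l.drop (n+1))) := by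
    conv_lhs => rw [← List.take_append_drop n l, ← List.getElem_cons_drop h]
    simp
  rw [h1, h2]
  simp only [← Multiset.singleton_add]
  abel

theorem maxScan_spec (arr : List (List Int)) (cnt i : Nat) (hcnt : cnt ≤ arr.length) :
    ((List.range cnt).foldl (fun mx j =>
      if PySem.List.pyGetD (arr.getD j []) 0 0 > PySem.List.pyGetD (arr.getD mx []) 0 0 then j
      else mx) i = i ∨
     (List.range cnt).foldl (fun mx j =>
      if PySem.List.pyGetD (arr.getD j []) 0 0 > PySem.List.pyGetD (arr.getD mx []) 0 0 then j
      else mx) i < cnt) ∧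
    PySem.List.pyGetD (arr.getD ((List.range cnt).foldl (fun mx j =>
      if PySem.List.pyGetD (arr.getD j []) 0 0 > PySem.List.pyGetD (arr.getD mx []) 0 0 then j
      else mx) i) []) 0 0 =
      ((arr.take cnt).map pvDur).foldl max (PySem.List.pyGetD (arr.getD i []) 0 0) := by
  induction cnt with
  | zero => simp
  | succ n ih =>
    have hn : n < arr.length := by omega
    have ih' := ih (by omega)
    rw [List.range_succ, List.foldl_append, List.take_succ_eq_append_getElem hn, List.map_append,
        List.foldl_append]
    simp only [List.foldl_cons, List.foldl_nil, List.map_cons, List.map_nil]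
    set r0 := (List.range n).foldl (fun mx j =>
      if PySem.List.pyGetD (arr.getD j []) 0 0 > PySem.List.pyGetD (arr.getD mx []) 0 0 then j
      else mx) i with hr0
    have hdn : PySem.List.pyGetD (arr.getD n []) 0 0 = pvDur arr[n] := by
      simp [pvDur, List.getD_eq_getElem?_getD, List.getElem?_eq_getElem hn]
    by_cases hc : PySem.List.pyGetD (arr.getD n []) 0 0 >
        PySem.List.pyGetD (arr.getD r0 []) 0 0
    · rw [if_pos hc]
      refine ⟨Or.inr (by omega), ?_⟩
      rw [hdn, ih'.2] at hc
      rw [hdn]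
      omega
    · rw [if_neg hc]
      refine ⟨ih'.1.imp id (fun h => by omega), ?_⟩
      rw [hdn, ih'.2] at hc
      rw [ih'.2]
      omega

theorem pvInv_step (cs arr : List (List Int)) (time : Int) (cnt : Nat)
    (taken : List Int) (timeB : Int) (i : Nat)
    (hinv : pvInv cs arr time cnt taken timeB i) (hi : i < cs.length) :
    pvInv cs (aStep (arr, time, cnt) i).1 (aStep (arr, time, cnt) i).2.1 (aStep (arr, time, cnt) i).2.2
      (bStep (taken, timeB) (cs.getD i [])).1 (bStep (taken, timeB) (cs.getD i [])).2 (i + 1) := by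
  
  obtain ⟨hlen, hcle, hagree, hsort, hms, htB, hltk⟩ := hinv
  have hci : arr.getD i [] = cs.getD i [] := hagree i le_rfl
  have hcnt_lt : cnt < arr.length := by omega
  simp only [aStep, bStep]
  rw [hci]
  set c := cs.getD i [] with hc
  set d := PySem.List.pyGetD c 0 0 with hd
  set dl := PySem.List.pyGetD c 1 0 with hdl
  set ds := (arr.take cnt).map pvDur with hds
  have hdslen : ds.length = cnt := by simp [hds]; omega
  have hmemds : ∀ x, x ∈ taken ↔ x ∈ ds := by
    intro x; rw [← Multiset.mem_coe, hms, Multiset.mem_coe]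
  -- B side: binary search, insert, pop
  obtain ⟨hlo_le, hloA, hloB⟩ := bsLoop_spec taken d 0 taken.length le_rfl (Nat.zero_le _)
    (fun k hk => absurd hk (Nat.not_lt_zero k)) (fun k hk hk2 => absurd hk2 (by omega)) hsort
  set lo := bsLoop taken d 0 taken.length with hlodef
  have hins : PySem.List.insert taken (lo : Int) d = taken.take lo ++ d :: taken.drop lo :=
    PySem.List.insert_natCast taken lo d hlo_le
  rw [hins]
  set tk' := taken.take lo ++ d :: taken.drop lo with htk'
  have hsort' : tk'.Pairwise (· ≤ ·) := sorted_insert_mid taken d lo hlo_le hsort hloA hloB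
  have hsortdl : tk'.dropLast.Pairwise (· ≤ ·) := List.Pairwise.sublist (List.dropLast_sublist tk') hsort'
  have hperm : tk'.Perm (d :: taken) := by
    refine List.perm_middle.trans ?_; rw [List.take_append_drop]
  have hmst' : (tk' : Multiset Int) = d ::ₘ (taken : Multiset Int) := Multiset.coe_eq_coe.mpr hperm
  have htk'ne : tk' ≠ [] := by simp [htk']
  have htk'len : tk'.length = cnt + 1 := by
    simp only [htk', List.length_append, List.length_cons, List.length_take, List.length_drop]
    omega
  have hdecomp : tk'.dropLast ++ [tk'.getLast htk'ne] = tk' := List.dropLast_concat_getLast htk'ne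
  set m := tk'.getLast htk'ne with hmdef
  have hpop : PySem.List.pop? tk' = some (m, tk'.dropLast) := by
    conv_lhs => rw [← hdecomp]
    exact PySem.List.pop?_last _ _
  have hmmax : ∀ x ∈ tk', x ≤ m := by
    intro x hx
    have hs2 := hsort'
    rw [← hdecomp, List.pairwise_append] at hs2
    rw [← hdecomp] at hx
    rcases List.mem_append.mp hx with h | h
    · exact hs2.2.2 x h m (List.mem_singleton_self m)
    · rw [List.mem_singleton.mp h]
  have hmsdl : (tk'.dropLast : Multiset Int) + {m} = (ds : Multiset Int) + {d} := by
    have h1 : (tk'.dropLast : Multiset Int) + {m} = (tk' : Multiset Int) := by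
      conv_rhs => rw [← hdecomp]
      rw [← Multiset.coe_add, Multiset.coe_singleton]
    rw [h1, hmst', hms, ← Multiset.singleton_add, add_comm]
  have hldl : tk'.dropLast.length = cnt := by
    rw [List.length_dropLast, htk'len]; omega
  -- the maximum value facts
  have hMfacts := PySem.List.le_foldl_max ds d
  have hMmem := PySem.List.foldl_max_mem ds d
  set M := ds.foldl max d with hMdef
  have hmem_tk' : m ∈ tk' := by
    rw [← hdecomp]; exact List.mem_append_right _ (List.mem_singleton_self m)
  have hmM : m = M := by
    have h1 : m ≤ M := by
      rcases List.mem_cons.mp (hperm.mem_iff.mp hmem_tk') with heq | hmem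
      · rw [heq]; exact hMfacts.1
      · exact hMfacts.2 m ((hmemds m).mp hmem)
    have h2 : M ≤ m := by
      rcases hMmem with heq | hmem2
      · rw [heq]; exact hmmax d (hperm.mem_iff.mpr (List.mem_cons_self))
      · exact hmmax M (hperm.mem_iff.mpr (List.mem_cons_of_mem d ((hmemds M).mpr hmem2)))
    omega
  
  by_cases hcond : time + d ≤ dl
  · -- take branch: A appends at cnt, B inserts and does not pop
    rw [if_pos hcond]
    have hnotlt : ¬ (dl < timeB + d) := by omega
    rw [if_neg hnotlt]
    dsimp only
    refine ⟨by simpa using hlen, by omega, ?_, hsort', ?_, by omega, by rw [htk'len]⟩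
    · intro j hj
      have hne : cnt ≠ j := by omega
      rw [List.getD_eq_getElem?_getD, List.getElem?_set_ne hne, ← List.getD_eq_getElem?_getD]
      exact hagree j (by omega)
    · have h2 : (arr.set cnt c).take (cnt+1) = arr.take cnt ++ [c] := by
        rw [List.take_set, List.take_succ_eq_append_getElem hcnt_lt,
            List.set_append_right _ _ (by simp [List.length_take])]
        simp [Nat.min_eq_left (Nat.le_of_lt hcnt_lt)]
      rw [h2, List.map_append]
      simp only [List.map_cons, List.map_nil]
      rw [hmst', hms]
      have hdc : pvDur c = d := by rw [pvDur, ← hd]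
      rw [hdc, ← hds, Multiset.cons_coe]
      exact Multiset.coe_eq_coe.mpr (List.perm_append_singleton d ds).symm
  · -- overflow branch: A max-scans, B pops the largest
    rw [if_neg hcond]
    have hlt : dl < timeB + d := by omega
    rw [if_pos hlt, hpop]
    obtain ⟨hmi_or, hmi_val⟩ := maxScan_spec arr cnt i (by omega)
    rw [hci, ← hd, ← hds, ← hMdef] at hmi_val
    set mi := (List.range cnt).foldl (fun mx j =>
      if PySem.List.pyGetD (arr.getD j []) 0 0 > PySem.List.pyGetD (arr.getD mx []) 0 0 then j
      else mx) i with hmidef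
    rw [hmi_val]
    by_cases hswap : M > d
    · rw [if_pos hswap]
      dsimp only
      have hmi_lt : mi < cnt := by
        rcases hmi_or with he | h
        · exfalso; rw [he, hci, ← hd] at hmi_val; omega
        · exact h
      refine ⟨by simpa using hlen, by omega, ?_, hsortdl, ?_, by rw [htB, hmM], hldl⟩
      · intro j hj
        have hne : mi ≠ j := by omega
        rw [List.getD_eq_getElem?_getD, List.getElem?_set_ne hne, ← List.getD_eq_getElem?_getD]
        exact hagree j (by omega)
      · have h2 : ((arr.set mi c).take cnt).map pvDur = ds.set mi d := by
          rw [List.take_set, List.map_set, ← hds]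
          have hdc : pvDur c = d := by rw [pvDur, ← hd]
          rw [hdc]
        rw [h2]
        have hmi_ds : mi < ds.length := by omega
        have h3 := multiset_set_add ds mi hmi_ds d
        have hds_mi : ds[mi] = M := by
          have hgm : ds[mi] = pvDur (arr[mi]'(by omega)) := by
            simp [hds, List.getElem_take]
          rw [hgm, ← hmi_val]
          simp [pvDur, List.getD_eq_getElem?_getD,
                List.getElem?_eq_getElem (show mi < arr.length by omega)]
        rw [hds_mi] at h3
        rw [hmM] at hmsdl
        exact Multiset.add_left_inj.mp (hmsdl.trans h3.symm)
    · rw [if_neg hswap]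
      dsimp only
      have hdM : M = d := by have := hMfacts.1; omega
      refine ⟨hlen, by omega, fun j hj => hagree j (by omega), hsortdl, ?_, by rw [htB, hmM, hdM]; ring_nf, hldl⟩
      rw [hmM, hdM] at hmsdl
      exact Multiset.add_left_inj.mp hmsdl


theorem pvInv_main (cs : List (List Int)) (k : Nat) :
    ∀ (i : Nat) (arr : List (List Int)) (time : Int) (cnt : Nat) (taken : List Int) (timeB : Int),
    i + k = cs.length → pvInv cs arr time cnt taken timeB i →
    ((List.range' i k).foldl aStep (arr, time, cnt)).2.2 =
      ((cs.drop i).foldl bStep (taken, timeB)).1.length := by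
  induction k with
  | zero =>
    intro i arr time cnt taken timeB hik hinv
    rw [List.drop_eq_nil_of_le (by omega)]
    simp only [List.range', List.foldl_nil]
    exact hinv.2.2.2.2.2.2.symm
  | succ k ih =>
    intro i arr time cnt taken timeB hik hinv
    have hilt : i < cs.length := by omega
    rw [List.range'_succ, ← List.getElem_cons_drop hilt]
    simp only [List.foldl_cons]
    have hstep := pvInv_step cs arr time cnt taken timeB i hinv hilt
    rw [List.getD_eq_getElem cs [] hilt] at hstep
    exact ih (i+1) _ _ _ _ _ (by omega) hstep

-- ===== VERDICT (by name: the statement is the Claim_ definition above) =====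
theorem scheduleCourse2_spec : Claim_equal_scheduleCourse2 := by
  intro courses _hdom _hpre
  unfold Spec_scheduleCourse2 scheduleCourse2 scheduleCourse2_alt
  simp only []
  set cs := PySem.List.sorted courses (fun x => PySem.List.pyGetD x 1 0) false with hcs
  have hinv0 : pvInv cs cs 0 0 [] 0 0 :=
    ⟨rfl, le_refl 0, fun j _ => rfl, List.Pairwise.nil, by simp, rfl, rfl⟩
  have h := pvInv_main cs cs.length 0 cs 0 0 [] 0 (by omega) hinv0
  rw [List.drop_zero] at h
  rw [List.range_eq_range']
  exact_mod_cast h
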